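-- pv_equiv track=rewrite | github.com/arisada/astrolol | astrolol/config/logging_setup.py | _logger_to_component
-- ===== SOURCE A (Python) =====
-- _COMPONENT_MAP = {
--     "devices": "device",
--     "indi":    "indi",
--     "mount":   "mount",
--     "imaging": "imager",
--     "focuser": "focuser",
--     "profiles": "profiles",
--     "api":        "api",
--     "phd2":       "phd2",
--     "platesolve": "platesolve",
-- }
--
-- def _logger_to_component(logger_name: str) -> str:
--     parts = (logger_name or "").split(".")
--     # "indi" is a sub-package of "devices" — check it before the generic loop
--     # so "astrolol.devices.indi.client" → "indi", not "device".
--     if "indi" in parts: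
--         return "indi"
--     for part in parts:
--         if part in _COMPONENT_MAP:
--             return _COMPONENT_MAP[part]
--     return parts[-1] or "app"
-- ===== SOURCE B (Python) =====
-- _COMPONENT_MAP = {
--     "devices": "device",
--     "indi":    "indi",
--     "mount":   "mount",
--     "imaging": "imager",
--     "focuser": "focuser",
--     "profiles": "profiles",
--     "api":        "api",
--     "phd2":       "phd2",
--     "platesolve": "platesolve",
-- }
--
-- def _logger_to_component(logger_name: str) -> str:
--     # single pass: exact "indi" part wins immediately; otherwise remember the
--     # first mapped part and fall back to the last part (or "app") at the end
--     parts = (logger_name or "").split(".")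
--     hit = None
--     for part in parts:
--         if part == "indi":
--             return "indi"
--         if hit is None and part in _COMPONENT_MAP:
--             hit = _COMPONENT_MAP[part]
--     if hit is not None:
--         return hit
--     return parts[-1] or "app"
-- ===== Notes on version B (the rewrite author's own statement) =====
-- stated objective: alternative
-- what changed: Replaces the separate 'indi' membership scan followed by a lookup loop with one single pass that returns 'indi' on sight and otherwise holds the first mapped component, falling back to the last part afterwards.
import Mathlib
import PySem

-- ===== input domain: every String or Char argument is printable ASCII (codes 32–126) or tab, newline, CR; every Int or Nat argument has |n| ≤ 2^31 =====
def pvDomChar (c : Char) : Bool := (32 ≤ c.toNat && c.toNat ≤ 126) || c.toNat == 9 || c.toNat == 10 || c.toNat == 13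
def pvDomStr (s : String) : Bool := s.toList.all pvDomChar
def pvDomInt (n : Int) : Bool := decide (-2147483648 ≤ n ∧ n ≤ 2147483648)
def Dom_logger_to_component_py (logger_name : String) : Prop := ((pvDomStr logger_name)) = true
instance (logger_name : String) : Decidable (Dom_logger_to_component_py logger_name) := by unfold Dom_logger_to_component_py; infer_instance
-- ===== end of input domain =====

-- B replaces A's separate "indi" membership scan + lookup loop by one single pass (alternative decomposition).


-- ===== PORT A =====
def pvComponentMap : PySem.Dict String String :=
  PySem.Dict.ofList [("devices", "device"), ("indi", "indi"), ("mount", "mount"),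
    ("imaging", "imager"), ("focuser", "focuser"), ("profiles", "profiles"),
    ("api", "api"), ("phd2", "phd2"), ("platesolve", "platesolve")]

-- 'return parts[-1] or "app"': split always yields a nonempty list, so the index is in range
-- and the 'none' branch is unreachable.
def pvLastOrApp (parts : List String) : String :=
  match PySem.List.pyGet? parts (-1) with
  | some v => if v == "" then "app" else v
  | none => "app"

-- A's loop: 'for part in parts: if part in _COMPONENT_MAP: return _COMPONENT_MAP[part]'
def pvLoopA (parts orig : List String) : String :=
  match parts with
  | [] => pvLastOrApp orig
  | p :: rest =>
    match pvComponentMap.get? p with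
    | some v => v
    | none => pvLoopA rest orig

def logger_to_component_py (logger_name : String) : String :=
  -- '.split(".")': the separator is the nonempty literal ".", so split? never returns none
  let parts := (PySem.Str.split? (if logger_name == "" then "" else logger_name) ".").getD []
  if parts.contains "indi" then "indi"
  else pvLoopA parts parts

-- ===== PORT B =====
-- B's single pass: return "indi" on sight, else remember the first mapped part in 'hit'.
def pvLoopB (parts : List String) (hit : Option String) (orig : List String) : String :=
  match parts with
  | [] =>
    match hit with
    | some v => v
    | none => pvLastOrApp orig
  | p :: rest =>
    if p == "indi" then "indi"
    else pvLoopB rest (match hit with | some _ => hit | none => pvComponentMap.get? p) orig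

def logger_to_component_py_alt (logger_name : String) : String :=
  let parts := (PySem.Str.split? (if logger_name == "" then "" else logger_name) ".").getD []
  pvLoopB parts none parts

-- ===== PRECONDITION & SPEC =====
def Spec_logger_to_component_py (logger_name : String) (out : String) : Prop := out = logger_to_component_py_alt logger_name
instance (logger_name : String) (out : String) : Decidable (Spec_logger_to_component_py logger_name out) := by unfold Spec_logger_to_component_py; infer_instance

-- ===== CLAIM (what is proved, stated in full; the proofs are below) =====
def Claim_equal_logger_to_component_py : Prop := ∀ (logger_name : String), Dom_logger_to_component_py logger_name → Spec_logger_to_component_py logger_name (logger_to_component_py logger_name)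

-- ===== LEMMAS AND PROOFS =====

-- invariant of B's single pass: it equals "indi"-check ∘ (held hit, else A's loop)
theorem pvLoopB_invariant (parts : List String) (hit : Option String) (orig : List String) :
    pvLoopB parts hit orig =
      if parts.contains "indi" then "indi"
      else match hit with
           | some v => v
           | none => pvLoopA parts orig := by
  induction parts generalizing hit with
  | nil => simp [pvLoopB, pvLoopA]
  | cons p rest ih =>
    by_cases hp : p = "indi"
    · subst hp; simp [pvLoopB]
    · have hpb : (p == "indi") = false := by simp [hp]
      simp only [pvLoopB, pvLoopA, hpb, Bool.false_eq_true, if_false]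
      rw [ih]
      have hip : ("indi" == p) = false := by simp [Ne.symm hp]
      have hc : ((p :: rest).contains "indi") = rest.contains "indi" := by
        simp only [List.contains_cons, hip, Bool.false_or]
      rw [hc]
      cases hit with
      | some v => rfl
      | none => cases pvComponentMap.get? p <;> simp

-- ===== VERDICT (by name: the statement is the Claim_ definition above) =====
theorem logger_to_component_py_spec : Claim_equal_logger_to_component_py := by
  intro s _
  unfold Spec_logger_to_component_py logger_to_component_py logger_to_component_py_alt
  rw [pvLoopB_invariant]
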